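-- pv_equiv track=rewrite | github.com/mercuryuan/MVP-SQL-V2 | graph/data_profiler.py | _get_word_frequency
-- ===== SOURCE A (Python) =====
-- import operator
-- from collections import Counter
--
-- def _get_word_frequency(values, top_k=10, by_word=False):
--     """
--     统计词频。
--     **关键保留**: 频率为1的词最多保留3个且长度不超过20的逻辑。
--     """
--     if not values:
--         return {}
--
--     if by_word:
--         all_words = " ".join(values).split()
--         word_count_dict = Counter(all_words)
--     else:
--         word_count_dict = Counter(values)
--
--     sorted_word_count_dict = dict(
--         sorted(word_count_dict.items(), key=operator.itemgetter(1), reverse=True)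
--     )
--
--     result = {}
--     one_freq_count = 0
--     found_one_freq = False
--
--     for word, freq in sorted_word_count_dict.items():
--         if len(result) >= top_k:
--             break
--         if freq == 1:
--             found_one_freq = True
--             if len(word) <= 20 and one_freq_count < 3:
--                 result[word] = freq
--                 one_freq_count += 1
--         else:
--             if not found_one_freq:
--                 result[word] = freq
--     return result
-- ===== SOURCE B (Python) =====
-- def _get_word_frequency(values, top_k=10, by_word=False):
--     # Bucket-by-frequency grouping instead of sorting the counter.
--     if by_word:
--         items = " ".join(values).split()
--     else:
--         items = values
--     counts = {}
--     for it in items: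
--         counts[it] = counts.get(it, 0) + 1
--     buckets = {}
--     max_freq = 0
--     for w, f in counts.items():
--         buckets.setdefault(f, []).append(w)
--         if f > max_freq:
--             max_freq = f
--     result = {}
--     for f in range(max_freq, 1, -1):
--         for w in buckets.get(f, []):
--             if len(result) < top_k:
--                 result[w] = f
--     ones = 0
--     for w in buckets.get(1, []):
--         if len(result) < top_k and ones < 3 and len(w) <= 20:
--             result[w] = 1
--             ones += 1
--     return result
-- ===== Notes on version B (the rewrite author's own statement) =====
-- stated objective: alternative
-- what changed: B replaces A's Counter + comparison sort of the items by a single grouping pass into integer-frequency buckets (plus a running max), then emits buckets from max_freq down to 2 and finally the capped freq-1 bucket; no sort is performed.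
import Mathlib
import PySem

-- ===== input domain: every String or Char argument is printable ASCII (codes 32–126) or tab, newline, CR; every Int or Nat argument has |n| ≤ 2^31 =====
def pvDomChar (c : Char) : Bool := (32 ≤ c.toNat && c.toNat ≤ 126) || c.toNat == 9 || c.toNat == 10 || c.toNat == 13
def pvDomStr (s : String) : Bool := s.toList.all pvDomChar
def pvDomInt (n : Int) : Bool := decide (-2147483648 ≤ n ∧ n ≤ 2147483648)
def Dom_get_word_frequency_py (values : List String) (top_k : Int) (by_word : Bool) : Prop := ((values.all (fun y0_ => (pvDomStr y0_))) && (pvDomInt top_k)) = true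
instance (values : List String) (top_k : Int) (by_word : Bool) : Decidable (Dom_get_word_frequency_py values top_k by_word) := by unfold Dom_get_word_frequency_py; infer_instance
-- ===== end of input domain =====

-- B groups words into integer-frequency buckets instead of sorting the counter; equal return value is proved below.

-- ===== PORT A =====
-- A's selection loop: for word, freq in sorted dict: break on len(result) >= top_k; freq==1 words
-- capped at 3 and length ≤ 20; freq>1 words only while no freq-1 word was seen.
def selA (top_k : Int) : List (String × Int) → PySem.Dict String Int → Int → Bool → PySem.Dict String Int
  | [], result, _, _ => result
  | (word, freq) :: rest, result, one_freq_count, found_one_freq =>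
    if top_k ≤ (result.size : Int) then result
    else if freq == 1 then
      if PySem.Str.len word ≤ 20 ∧ one_freq_count < 3 then
        selA top_k rest (result.insert word freq) (one_freq_count + 1) true
      else selA top_k rest result one_freq_count true
    else if found_one_freq then selA top_k rest result one_freq_count found_one_freq
    else selA top_k rest (result.insert word freq) one_freq_count found_one_freq

def get_word_frequency_py (values : List String) (top_k : Int) (by_word : Bool) : List (String × Int) :=
  if values = [] then []
  else
    let word_count_dict : PySem.Dict String Int :=
      if by_word then PySem.Dict.counter (PySem.Str.split₀ (PySem.Str.join " " values))
      else PySem.Dict.counter values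
    let sorted_word_count_dict :=
      PySem.Dict.ofList (PySem.List.sorted word_count_dict.items (fun p => p.2) true)
    (selA top_k sorted_word_count_dict.items PySem.Dict.empty 0 false).items

-- ===== PORT B =====
def get_word_frequency_py_alt (values : List String) (top_k : Int) (by_word : Bool) : List (String × Int) :=
  let items := if by_word then PySem.Str.split₀ (PySem.Str.join " " values) else values
  -- counts[it] = counts.get(it, 0) + 1
  let counts := items.foldl (fun d it => d.insert it (d.getD it 0 + 1))
      (PySem.Dict.empty : PySem.Dict String Int)
  -- one loop building the frequency buckets (buckets.setdefault(f, []).append(w) = modify) and the running max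
  let bm := counts.items.foldl
      (fun (bm : PySem.Dict Int (List String) × Int) p =>
        (bm.1.modify p.2 [] (fun l => l ++ [p.1]), if p.2 > bm.2 then p.2 else bm.2))
      (PySem.Dict.empty, 0)
  -- for f in range(max_freq, 1, -1): for w in buckets.get(f, []): ...
  let result := (PySem.List.pyRange bm.2 1 (-1)).foldl
      (fun r f => (bm.1.getD f []).foldl
        (fun (r : PySem.Dict String Int) w => if (r.size : Int) < top_k then r.insert w f else r) r)
      (PySem.Dict.empty : PySem.Dict String Int)
  -- the frequency-1 bucket, capped at 3 words of length ≤ 20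
  let final := (bm.1.getD 1 []).foldl
      (fun (p : PySem.Dict String Int × Int) w =>
        if (p.1.size : Int) < top_k ∧ p.2 < 3 ∧ PySem.Str.len w ≤ 20 then (p.1.insert w 1, p.2 + 1)
        else p)
      (result, 0)
  final.1.items

-- ===== PRECONDITION & SPEC =====
def Spec_get_word_frequency_py (values : List String) (top_k : Int) (by_word : Bool) (out : List (String × Int)) : Prop := out = get_word_frequency_py_alt values top_k by_word
instance (values : List String) (top_k : Int) (by_word : Bool) (out : List (String × Int)) : Decidable (Spec_get_word_frequency_py values top_k by_word out) := by unfold Spec_get_word_frequency_py; infer_instance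

-- ===== CLAIM (what is proved, stated in full; the proofs are below) =====
def Claim_equal_get_word_frequency_py : Prop := ∀ (values : List String) (top_k : Int) (by_word : Bool), Dom_get_word_frequency_py values top_k by_word → Spec_get_word_frequency_py values top_k by_word (get_word_frequency_py values top_k by_word)

-- ===== LEMMAS AND PROOFS =====

-- the bucket+max foldl with a product state splits componentwise
theorem pv_foldl_pair (l : List (String × Int)) (i : PySem.Dict Int (List String)) (j : Int) :
    l.foldl (fun bm p => (bm.1.modify p.2 [] fun l => l ++ [p.1], if p.2 > bm.2 then p.2 else bm.2)) (i, j)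
      = (l.foldl (fun d p => d.modify p.2 [] (fun ws => ws ++ [p.1])) i,
         l.foldl (fun m p => if p.2 > m then p.2 else m) j) := by
  induction l generalizing i j with
  | nil => rfl
  | cons x t ih => simpa using ih (i.modify x.2 [] (fun ws => ws ++ [x.1])) (if x.2 > j then x.2 else j)

-- the running max loop bounds every element
theorem pv_maxf_bound (l : List (String × Int)) (m : Int) :
    m ≤ l.foldl (fun m p => if p.2 > m then p.2 else m) m ∧
    ∀ p ∈ l, p.2 ≤ l.foldl (fun m p => if p.2 > m then p.2 else m) m := by
  induction l generalizing m with
  | nil => exact ⟨le_refl m, by simp⟩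
  | cons x t ih =>
    have h := ih (if x.2 > m then x.2 else m)
    refine ⟨le_trans (by split <;> omega) h.1, ?_⟩
    intro p hp
    rcases List.mem_cons.mp hp with rfl | hp
    · exact le_trans (by split <;> omega) h.1
    · exact h.2 p hp

theorem pv_flatMap_congr {α β : Type} (l : List α) (f g : α → List β)
    (h : ∀ a ∈ l, f a = g a) : l.flatMap f = l.flatMap g := by
  induction l with
  | nil => rfl
  | cons x t ih => simp only [List.flatMap_cons, h x (by simp), ih fun a ha => h a (by simp [ha])]

theorem pv_foldl_flatMap {α β γ : Type} (l : List α) (g : α → List β) (f : γ → β → γ) (i : γ) :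
    (l.flatMap g).foldl f i = l.foldl (fun a x => (g x).foldl f a) i := by
  induction l generalizing i with
  | nil => rfl
  | cons x t ih => simp [List.flatMap_cons, List.foldl_append, ih]

theorem pv_insertBy_skip {α : Type} (bef : α → α → Bool) (x : α) (ys zs : List α)
    (h : ∀ y ∈ ys, bef x y = false) :
    PySem.List.insertBy bef x (ys ++ zs) = ys ++ PySem.List.insertBy bef x zs := by
  induction ys with
  | nil => rfl
  | cons y t ih =>
    simp only [List.cons_append, PySem.List.insertBy, h y (by simp), Bool.false_eq_true,
      if_false, List.cons.injEq, true_and]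
    exact ih fun z hz => h z (by simp [hz])

theorem pv_insertBy_front {α : Type} (bef : α → α → Bool) (x : α) (zs : List α)
    (h : ∀ y ∈ zs, bef x y = true) :
    PySem.List.insertBy bef x zs = x :: zs := by
  cases zs with
  | nil => rfl
  | cons z t => simp [PySem.List.insertBy, h z (by simp)]

-- inserting x into the bucket concatenation appends it to its own bucket
theorem pv_insert_bucket (b : Int) (n : Nat) (L : List (String × Int)) (x : String × Int)
    (hlo : b < x.2) (hhi : x.2 ≤ b + n) :
    PySem.List.insertBy (fun p q : String × Int => decide (q.2 < p.2)) x
        ((PySem.List.pyRange (b + n) b (-1)).flatMap (fun f => L.filter (fun p => p.2 == f)))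
      = (PySem.List.pyRange (b + n) b (-1)).flatMap (fun f => (L ++ [x]).filter (fun p => p.2 == f)) := by
  induction n generalizing L with
  | zero => omega
  | succ k ih =>
    have hb : b < b + ((k : Int) + 1) := by omega
    have hcast : (((k : Nat) + 1 : Nat) : Int) = (k : Int) + 1 := by push_cast; ring
    rw [hcast] at *
    rw [PySem.List.pyRange_neg_one_cons hb, List.flatMap_cons, List.flatMap_cons,
      show b + ((k : Int) + 1) - 1 = b + (k : Int) by ring]
    by_cases hx : x.2 = b + ((k : Int) + 1)
    · -- x belongs to the topmost bucket: it skips that bucket and lands right after it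
      have htail : ∀ y ∈ (PySem.List.pyRange (b + (k : Int)) b (-1)).flatMap
          (fun f => L.filter (fun p => p.2 == f)),
          (fun p q : String × Int => decide (q.2 < p.2)) x y = true := by
        intro y hy
        rcases List.mem_flatMap.mp hy with ⟨f, hf, hyf⟩
        have hfr := PySem.List.mem_pyRange_neg_one.mp hf
        have : y.2 = f := by simpa using List.of_mem_filter hyf
        simp only [decide_eq_true_eq]
        omega
      have hrest : (PySem.List.pyRange (b + (k : Int)) b (-1)).flatMap
            (fun f => (L ++ [x]).filter (fun p => p.2 == f))
          = (PySem.List.pyRange (b + (k : Int)) b (-1)).flatMap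
            (fun f => L.filter (fun p => p.2 == f)) := by
        apply pv_flatMap_congr
        intro f hf
        have hfr := PySem.List.mem_pyRange_neg_one.mp hf
        rw [List.filter_append, show (List.filter (fun p => p.2 == f) [x]) = [] by
          simp only [List.filter_eq_nil_iff, List.mem_singleton, beq_iff_eq]
          intro y hy
          subst hy
          omega, List.append_nil]
      rw [pv_insertBy_skip _ _ _ _ (fun y hy => by
          have : y.2 = b + ((k : Int) + 1) := by simpa using List.of_mem_filter hy
          simp only [decide_eq_false_iff_not, not_lt]
          omega),
        pv_insertBy_front _ _ _ htail, hrest,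
        List.filter_append, show (List.filter (fun p => p.2 == b + ((k : Int) + 1)) [x]) = [x] by
          simp [hx]]
      simp
    · -- x is strictly below the topmost bucket: skip it and recurse
      have hx2 : x.2 ≤ b + (k : Int) := by omega
      rw [pv_insertBy_skip _ _ _ _ (fun y hy => by
          have : y.2 = b + ((k : Int) + 1) := by simpa using List.of_mem_filter hy
          simp only [decide_eq_false_iff_not, not_lt]
          omega),
        ih L hx2, List.filter_append, show (List.filter (fun p => p.2 == b + ((k : Int) + 1)) [x]) = [] by
          simp only [List.filter_eq_nil_iff, List.mem_singleton, beq_iff_eq]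
          intro y hy
          subst hy
          omega, List.append_nil]

-- the stable descending sort by frequency IS the bucket concatenation
theorem pv_sorted_buckets (L : List (String × Int)) (a : Int)
    (h : ∀ p ∈ L, 0 < p.2 ∧ p.2 ≤ a) :
    PySem.List.sorted L (fun p => p.2) true
      = (PySem.List.pyRange a 0 (-1)).flatMap (fun f => L.filter (fun p => p.2 == f)) := by
  induction L using List.reverseRecOn with
  | nil => simp [PySem.List.sorted]
  | append_singleton L x ih =>
    have hx := h x (by simp)
    have ha : (0 : Int) + ((a.toNat : Nat) : Int) = a := by
      rw [Int.toNat_of_nonneg (by omega)]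
      ring
    rw [PySem.List.sorted_rev_eq_foldl_insertBy, List.foldl_append, List.foldl_cons,
      List.foldl_nil, ← PySem.List.sorted_rev_eq_foldl_insertBy,
      ih (fun p hp => h p (by simp [hp])), ← ha]
    exact pv_insert_bucket 0 a.toNat L x (by omega) (by omega)

theorem pv_range_split (a : Int) (h : 1 ≤ a) :
    PySem.List.pyRange a 0 (-1) = PySem.List.pyRange a 1 (-1) ++ [1] := by
  rw [PySem.List.pyRange_neg_one_eq_reverse a 0, PySem.List.pyRange_neg_one_eq_reverse a 1,
    show (0:Int) + 1 = 1 by norm_num, show (1:Int) + 1 = 2 by norm_num,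
    PySem.List.pyRange_one_append 1 2 (a+1) (by omega) (by omega), List.reverse_append,
    show (2:Int) = 1 + 1 by norm_num, PySem.List.pyRange_one_singleton]
  rfl

-- B's bucket dict holds exactly the filter of the items list
theorem pv_buckets_getD (l : List (String × Int)) (f : Int) :
    (l.foldl (fun d p => d.modify p.2 [] (fun ws => ws ++ [p.1]))
        (PySem.Dict.empty : PySem.Dict Int (List String))).getD f []
      = (l.filter (fun p => p.2 == f)).map (fun p => p.1) := by
  have hm : l.foldl (fun d p => d.modify p.2 [] (fun ws => ws ++ [p.1]))
      (PySem.Dict.empty : PySem.Dict Int (List String))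
    = (l.map Prod.swap).foldl (fun d q => d.modify q.1 [] (fun ws => ws ++ [q.2]))
      (PySem.Dict.empty : PySem.Dict Int (List String)) := by
    rw [List.foldl_map]
    rfl
  rw [hm, PySem.Dict.getD_foldl_modify_append, PySem.Dict.getD_empty, List.nil_append,
    List.filter_map, List.map_map]
  rfl

-- every pair of the f-bucket is (word, f)
theorem pv_bucket_pairs (l : List (String × Int)) (f : Int) :
    l.filter (fun p => p.2 == f)
      = ((l.filter (fun p => p.2 == f)).map (fun p => p.1)).map (fun w => (w, f)) := by
  rw [List.map_map]
  conv_lhs => rw [← List.map_id (l.filter (fun p => p.2 == f))]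
  apply List.map_congr_left
  intro q hq
  have h2 : q.2 = f := by simpa using List.of_mem_filter hq
  cases q
  simp_all

theorem pv_selA_stuck (top_k : Int) (O : List (String × Int)) (d : PySem.Dict String Int)
    (c : Int) (fo : Bool) (h : top_k ≤ (d.size : Int)) : selA top_k O d c fo = d := by
  cases O with
  | nil => rfl
  | cons p t =>
    obtain ⟨w, f⟩ := p
    simp [selA, h]

theorem pv_high_stuck (top_k : Int) (l : List (String × Int)) (d : PySem.Dict String Int)
    (h : top_k ≤ (d.size : Int)) :
    l.foldl (fun r p => if (r.size : Int) < top_k then r.insert p.1 p.2 else r) d = d := by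
  induction l with
  | nil => rfl
  | cons p t ih =>
    simp only [List.foldl_cons, if_neg (by omega : ¬ ((d.size : Int) < top_k))]
    exact ih

theorem pv_ones_stuck (top_k : Int) (l : List (String × Int)) (d : PySem.Dict String Int) (c : Int)
    (h : top_k ≤ (d.size : Int)) :
    l.foldl (fun (p : PySem.Dict String Int × Int) q =>
        if (p.1.size : Int) < top_k ∧ p.2 < 3 ∧ PySem.Str.len q.1 ≤ 20 then (p.1.insert q.1 1, p.2 + 1)
        else p) (d, c) = (d, c) := by
  induction l with
  | nil => rfl
  | cons q t ih =>
    simp only [List.foldl_cons,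
      if_neg (fun hc => absurd hc.1 (by omega) : ¬ (((d.size : Int) < top_k) ∧ c < 3 ∧ PySem.Str.len q.1 ≤ 20))]
    exact ih

-- A's loop on the freq>1 prefix is B's plain truncated fill
theorem pv_selA_high (top_k : Int) (H O : List (String × Int)) (d : PySem.Dict String Int) (c : Int)
    (h : ∀ p ∈ H, p.2 ≠ 1) :
    selA top_k (H ++ O) d c false
      = selA top_k O (H.foldl (fun r p => if (r.size : Int) < top_k then r.insert p.1 p.2 else r) d) c false := by
  induction H generalizing d with
  | nil => simp
  | cons p t ih =>
    obtain ⟨w, f⟩ := p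
    have hf : (f == 1) = false := by
      simpa using h (w, f) (by simp)
    by_cases hc : top_k ≤ (d.size : Int)
    · rw [List.cons_append, pv_selA_stuck top_k _ d c false hc,
        pv_high_stuck top_k _ d hc, pv_selA_stuck top_k O d c false hc]
    · simp only [List.cons_append, selA, if_neg hc, hf, Bool.false_eq_true, if_false,
        List.foldl_cons, if_pos (by omega : (d.size : Int) < top_k)]
      exact ih (d.insert w f) fun q hq => h q (by simp [hq])

-- A's loop on the freq=1 suffix is B's capped fill
theorem pv_selA_ones (top_k : Int) (O : List (String × Int)) (d : PySem.Dict String Int)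
    (c : Int) (fo : Bool) (h : ∀ p ∈ O, p.2 = 1) :
    selA top_k O d c fo
      = (O.foldl (fun (p : PySem.Dict String Int × Int) q =>
          if (p.1.size : Int) < top_k ∧ p.2 < 3 ∧ PySem.Str.len q.1 ≤ 20 then (p.1.insert q.1 1, p.2 + 1)
          else p) (d, c)).1 := by
  induction O generalizing d c fo with
  | nil => rfl
  | cons q t ih =>
    obtain ⟨w, f⟩ := q
    have hf : f = 1 := h (w, f) (by simp)
    subst hf
    by_cases hc : top_k ≤ (d.size : Int)
    · rw [pv_selA_stuck top_k _ d c fo hc]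
      simp only [List.foldl_cons,
        if_neg (fun hx => absurd hx.1 (by omega) : ¬ (((d.size : Int) < top_k) ∧ c < 3 ∧ PySem.Str.len w ≤ 20)),
        pv_ones_stuck top_k t d c hc]
    · by_cases h2 : PySem.Str.len w ≤ 20 ∧ c < 3
      · simp only [selA, if_neg hc, beq_self_eq_true, if_true, if_pos h2, List.foldl_cons,
          if_pos (⟨by omega, h2.2, h2.1⟩ : ((d.size : Int) < top_k) ∧ c < 3 ∧ PySem.Str.len w ≤ 20)]
        exact ih (d.insert w 1) (c+1) true fun p hp => h p (by simp [hp])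
      · simp only [selA, if_neg hc, beq_self_eq_true, if_true, if_neg h2, List.foldl_cons,
          if_neg (fun hx => h2 ⟨hx.2.2, hx.2.1⟩ : ¬ (((d.size : Int) < top_k) ∧ c < 3 ∧ PySem.Str.len w ≤ 20))]
        exact ih d c true fun p hp => h p (by simp [hp])


-- the selection pipeline over an arbitrary items list with unique words and positive counts
theorem pv_pipeline (its : List (String × Int)) (top_k : Int)
    (hnd : (its.map (fun p => p.1)).Nodup)
    (hpos : ∀ p ∈ its, 0 < p.2) :
    (selA top_k (PySem.Dict.ofList (PySem.List.sorted its (fun p => p.2) true)).items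
      PySem.Dict.empty 0 false).items
    = (let bm := its.foldl
          (fun (bm : PySem.Dict Int (List String) × Int) p =>
            (bm.1.modify p.2 [] (fun l => l ++ [p.1]), if p.2 > bm.2 then p.2 else bm.2))
          (PySem.Dict.empty, 0)
       let result := (PySem.List.pyRange bm.2 1 (-1)).foldl
          (fun r f => (bm.1.getD f []).foldl
            (fun (r : PySem.Dict String Int) w => if (r.size : Int) < top_k then r.insert w f else r) r)
          (PySem.Dict.empty : PySem.Dict String Int)
       let final := (bm.1.getD 1 []).foldl
          (fun (p : PySem.Dict String Int × Int) w =>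
            if (p.1.size : Int) < top_k ∧ p.2 < 3 ∧ PySem.Str.len w ≤ 20 then (p.1.insert w 1, p.2 + 1)
            else p)
          (result, 0)
       final.1.items) := by
  simp only []
  rw [pv_foldl_pair]
  have hBD : ∀ f, (its.foldl (fun d p => d.modify p.2 [] (fun ws => ws ++ [p.1]))
      (PySem.Dict.empty : PySem.Dict Int (List String))).getD f []
      = (its.filter (fun p => p.2 == f)).map (fun p => p.1) :=
    fun f => pv_buckets_getD its f
  have hnodup : ((PySem.List.sorted its (fun p => p.2) true).map (fun p => p.1)).Nodup :=
    (((PySem.List.sorted_perm its (fun p => p.2) true).map (fun p => p.1)).nodup_iff).mpr hnd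
  have hsd : (PySem.Dict.ofList (PySem.List.sorted its (fun p => p.2) true)).items
      = PySem.List.sorted its (fun p => p.2) true := by
    show (List.foldl (fun (acc : PySem.Dict String Int) (p : String × Int) => acc.insert p.1 p.2)
        PySem.Dict.empty (PySem.List.sorted its (fun p => p.2) true)).items = _
    rw [PySem.Dict.items_foldl_insert_fresh (PySem.List.sorted its (fun p => p.2) true)
      (fun (p : String × Int) => p.1) (fun (p : String × Int) => p.2) PySem.Dict.empty
      (fun a _ => PySem.Dict.contains_empty a.1) hnodup]
    simp
    rfl
  rw [hsd]
  by_cases hits : its = []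
  · subst hits
    rfl
  · set M := its.foldl (fun m p => if p.2 > m then p.2 else m) 0 with hM_def
    have hb : ∀ p ∈ its, 0 < p.2 ∧ p.2 ≤ M :=
      fun p hp => ⟨hpos p hp, (pv_maxf_bound its 0).2 p hp⟩
    have hM1 : 1 ≤ M := by
      obtain ⟨p, hp⟩ := List.exists_mem_of_ne_nil its hits
      have := hb p hp
      omega
    rw [pv_sorted_buckets its M hb, pv_range_split M hM1, List.flatMap_append,
      List.flatMap_cons, List.flatMap_nil, List.append_nil]
    rw [pv_selA_high top_k _ _ PySem.Dict.empty 0 (by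
      intro p hp
      rcases List.mem_flatMap.mp hp with ⟨f, hf, hpf⟩
      have hfr := PySem.List.mem_pyRange_neg_one.mp hf
      have : p.2 = f := by simpa using List.of_mem_filter hpf
      omega)]
    rw [pv_selA_ones top_k _ _ 0 false (by
      intro p hp
      simpa using List.of_mem_filter hp)]
    -- the freq>1 fill: B's bucket-by-bucket fold is A's fold over the concatenation
    have hfun : (fun (r : PySem.Dict String Int) (f : Int) =>
          ((its.foldl (fun d p => d.modify p.2 [] (fun ws => ws ++ [p.1]))
              (PySem.Dict.empty : PySem.Dict Int (List String))).getD f []).foldl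
            (fun (r : PySem.Dict String Int) w => if (r.size : Int) < top_k then r.insert w f else r) r)
        = (fun (r : PySem.Dict String Int) (f : Int) => (its.filter (fun p => p.2 == f)).foldl
            (fun r p => if (r.size : Int) < top_k then r.insert p.1 p.2 else r) r) := by
      funext r f
      rw [hBD f]
      conv_rhs => rw [pv_bucket_pairs its f]
      conv_rhs => rw [List.foldl_map]
    have hhigh : (PySem.List.pyRange M 1 (-1)).foldl
        (fun r f => ((its.foldl (fun d p => d.modify p.2 [] (fun ws => ws ++ [p.1]))
            (PySem.Dict.empty : PySem.Dict Int (List String))).getD f []).foldl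
          (fun (r : PySem.Dict String Int) w => if (r.size : Int) < top_k then r.insert w f else r) r)
        PySem.Dict.empty
        = ((PySem.List.pyRange M 1 (-1)).flatMap (fun f => its.filter (fun p => p.2 == f))).foldl
          (fun r p => if (r.size : Int) < top_k then r.insert p.1 p.2 else r) PySem.Dict.empty := by
      rw [hfun]
      exact (pv_foldl_flatMap _ _ _ _).symm
    -- the freq=1 fill: B's word fold is A's pair fold
    have hones : ∀ (r : PySem.Dict String Int),
        ((its.foldl (fun d p => d.modify p.2 [] (fun ws => ws ++ [p.1]))
            (PySem.Dict.empty : PySem.Dict Int (List String))).getD 1 []).foldl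
          (fun (p : PySem.Dict String Int × Int) w =>
            if (p.1.size : Int) < top_k ∧ p.2 < 3 ∧ PySem.Str.len w ≤ 20 then (p.1.insert w 1, p.2 + 1)
            else p) (r, 0)
        = (its.filter (fun p => p.2 == (1:Int))).foldl
          (fun (p : PySem.Dict String Int × Int) q =>
            if (p.1.size : Int) < top_k ∧ p.2 < 3 ∧ PySem.Str.len q.1 ≤ 20 then (p.1.insert q.1 1, p.2 + 1)
            else p) (r, 0) := by
      intro r
      rw [hBD 1]
      conv_rhs => rw [pv_bucket_pairs its 1]
      conv_rhs => rw [List.foldl_map]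
    rw [hhigh, hones]

-- the whole pipeline, for the already-resolved word list xs
theorem pv_main (xs : List String) (top_k : Int) :
    (selA top_k (PySem.Dict.ofList
        (PySem.List.sorted (PySem.Dict.counter xs).items (fun p => p.2) true)).items
      PySem.Dict.empty 0 false).items
    = (let counts : PySem.Dict String Int := PySem.Dict.counter xs
       let bm := counts.items.foldl
          (fun (bm : PySem.Dict Int (List String) × Int) p =>
            (bm.1.modify p.2 [] (fun l => l ++ [p.1]), if p.2 > bm.2 then p.2 else bm.2))
          (PySem.Dict.empty, 0)
       let result := (PySem.List.pyRange bm.2 1 (-1)).foldl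
          (fun r f => (bm.1.getD f []).foldl
            (fun (r : PySem.Dict String Int) w => if (r.size : Int) < top_k then r.insert w f else r) r)
          (PySem.Dict.empty : PySem.Dict String Int)
       let final := (bm.1.getD 1 []).foldl
          (fun (p : PySem.Dict String Int × Int) w =>
            if (p.1.size : Int) < top_k ∧ p.2 < 3 ∧ PySem.Str.len w ≤ 20 then (p.1.insert w 1, p.2 + 1)
            else p)
          (result, 0)
       final.1.items) := by
  apply pv_pipeline (PySem.Dict.counter xs).items top_k
  · show ((PySem.Dict.counter xs).keys).Nodup
    exact PySem.Dict.nodup_keys_counter xs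
  · intro p hp
    have hp' : p ∈ (PySem.Set.ofList xs).map (fun k => (k, (xs.count k : Int))) := by
      rw [← PySem.Dict.items_counter xs]
      exact hp
    rcases List.mem_map.mp hp' with ⟨k, hk, rfl⟩
    have hkx : k ∈ xs := (PySem.Set.mem_ofList xs k).mp hk
    simpa using List.count_pos_iff.mpr hkx

-- ===== VERDICT (by name: the statement is the Claim_ definition above) =====
theorem get_word_frequency_py_spec : Claim_equal_get_word_frequency_py := by
  intro values top_k by_word _dom
  unfold Spec_get_word_frequency_py
  by_cases hv : values = []
  · subst hv
    cases by_word <;> rfl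
  · unfold get_word_frequency_py get_word_frequency_py_alt
    rw [if_neg hv]
    cases by_word
    · simpa using pv_main values top_k
    · simpa using pv_main (PySem.Str.split₀ (PySem.Str.join " " values)) top_k
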